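-- pv_equiv track=rewrite | github.com/becelli/real-networking | ipv6-calculator/main.py | fill_ipv6
-- ===== SOURCE A (Python) =====
-- def fill_ipv6(ip):
--     # Preenche o endereço IPv6 com zeros, retornando uma string com 8 grupos de 4 dígitos, separados por dois pontos.
--
--     groups = ip.split(':')
--     groups_count = len(groups)
--     number_of_zeros = 8 - groups_count
--
--     # Se o endereço IPv6 não tiver 8 grupos, cria-os preenchendo com zeros.
--     for _ in range(number_of_zeros):
--         groups.insert(groups.index(''), '0000')
--
--     # Se os zeros a esquerda foram abrevidados, preenche-os com zeros.
--     for i, group in enumerate(groups):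
--         if len(group) < 4:
--             groups[i] = group.zfill(4)
--
--     return ':'.join(groups)
-- ===== SOURCE B (Python) =====
-- def fill_ipv6(ip):
--     groups = ip.split(':')
--     n = 8 - len(groups)
--     out = []
--     filled = n <= 0
--     for g in groups:
--         if not filled and g == '':
--             out.extend(['0000'] * n)
--             filled = True
--         out.append(g.zfill(4))
--     return ':'.join(out)
-- ===== Notes on version B (the rewrite author's own statement) =====
-- stated objective: alternative
-- what changed: B is a single streaming pass with an output accumulator and a 'filled' flag that emits the missing zero groups inline the first time it meets an empty group and zfills each group as it is appended, instead of A's staged passes (repeated index('')+insert mutation of the list, then a second indexed zfill loop).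
import Mathlib
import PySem

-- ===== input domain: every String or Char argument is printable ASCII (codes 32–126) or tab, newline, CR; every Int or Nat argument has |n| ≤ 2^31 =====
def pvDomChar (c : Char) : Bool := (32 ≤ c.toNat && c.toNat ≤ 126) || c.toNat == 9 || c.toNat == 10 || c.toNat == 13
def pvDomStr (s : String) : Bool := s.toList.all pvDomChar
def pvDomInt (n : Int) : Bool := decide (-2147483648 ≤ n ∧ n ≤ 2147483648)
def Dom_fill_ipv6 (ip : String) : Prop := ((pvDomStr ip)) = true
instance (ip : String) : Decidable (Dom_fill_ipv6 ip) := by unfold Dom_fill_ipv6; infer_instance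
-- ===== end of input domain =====

-- B replaces A's staged passes (repeated index('')+insert, then an indexed zfill loop) by one
-- streaming pass with an accumulator and a 'filled' flag that emits the zero groups inline
-- (objective: alternative decomposition).

-- ===== PORT A =====
-- one step of A's first loop: groups.insert(groups.index(''), '0000'); none = ValueError from index()
def fillStepA (o : Option (List String)) : Option (List String) :=
  o.bind fun gs => (PySem.List.index? gs "").map fun (i : Nat) => PySem.List.insert gs (i : Int) "0000"

def fill_ipv6 (ip : String) : String :=
  let groups := (PySem.Str.split? ip ":").getD []      -- sep ":" ≠ "", so split? is always some
  let groupsCount : Int := PySem.List.len groups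
  let numberOfZeros : Int := 8 - groupsCount
  match (PySem.List.pyRange 0 numberOfZeros 1).foldl (fun o _ => fillStepA o) (some groups) with
  | none => ""                                          -- unreachable under Pre_ (Python raises ValueError)
  | some gs =>
      let gs2 := (PySem.List.enumerate gs 0).foldl
        (fun acc p => if PySem.Str.len p.2 < 4 then PySem.List.pySetD acc p.1 (PySem.Str.zfill p.2 4) else acc)
        gs
      PySem.Str.join ":" gs2

-- ===== PORT B =====
-- one step of B's single streaming loop over the groups: state = (out, filled)
def fillStepB (n : Int) (st : List String × Bool) (g : String) : List String × Bool :=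
  let st := if !st.2 && (g == "") then (st.1 ++ PySem.List.pyRepeat ["0000"] n, true) else st
  (st.1 ++ [PySem.Str.zfill g 4], st.2)

def fill_ipv6_alt (ip : String) : String :=
  let groups := (PySem.Str.split? ip ":").getD []
  let n : Int := 8 - PySem.List.len groups
  let st := groups.foldl (fillStepB n) ([], decide (n ≤ 0))
  PySem.Str.join ":" st.1

-- ===== PRECONDITION & SPEC =====
-- Pre_ excludes exactly the inputs where A raises ValueError: fewer than 8 colon-groups and no empty group.
def Pre_fill_ipv6 (ip : String) : Prop :=
  8 ≤ ((PySem.Str.split? ip ":").getD []).length ∨ "" ∈ (PySem.Str.split? ip ":").getD []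
instance (ip : String) : Decidable (Pre_fill_ipv6 ip) := by unfold Pre_fill_ipv6; infer_instance
def pvWitness_fill_ipv6 : String := "1:2::3"

def Spec_fill_ipv6 (ip : String) (out : String) : Prop := out = fill_ipv6_alt ip
instance (ip : String) (out : String) : Decidable (Spec_fill_ipv6 ip out) := by unfold Spec_fill_ipv6; infer_instance

-- ===== CLAIM (what is proved, stated in full; the proofs are below) =====
def Claim_equal_fill_ipv6 : Prop := ∀ (ip : String), Dom_fill_ipv6 ip → Pre_fill_ipv6 ip → Spec_fill_ipv6 ip (fill_ipv6 ip)

-- ===== LEMMAS AND PROOFS =====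

-- a for-loop that ignores the loop variable is iteration of its body
theorem foldl_ignore_iterate {α β : Type} (f : α → α) (l : List β) (a : α) :
    l.foldl (fun x _ => f x) a = f^[l.length] a := by
  induction l generalizing a with
  | nil => rfl
  | cons x t ih => simp [List.foldl, ih, Function.iterate_succ_apply]

-- k rounds of A's insert-at-first-empty loop splice k copies of "0000" in front of the first ""
theorem iterate_fillStepA (pre suf : List String) (h : "" ∉ pre) (k : Nat) :
    fillStepA^[k] (some (pre ++ "" :: suf)) =
      some (pre ++ List.replicate k "0000" ++ "" :: suf) := by
  induction k with
  | zero => simp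
  | succ k ih =>
      rw [Function.iterate_succ_apply', ih]
      have hpre' : "" ∉ pre ++ List.replicate k "0000" := by
        simp [List.mem_append, List.mem_replicate, h]
      have hidx : PySem.List.index? (pre ++ List.replicate k "0000" ++ "" :: suf) "" =
          some (pre ++ List.replicate k "0000").length :=
        (PySem.List.index?_eq_some_iff _ _ _).mpr ⟨pre ++ List.replicate k "0000", suf, rfl, rfl, hpre'⟩
      have hstep : fillStepA (some (pre ++ List.replicate k "0000" ++ "" :: suf)) =
          (PySem.List.index? (pre ++ List.replicate k "0000" ++ "" :: suf) "").map
            (fun (i : Nat) => PySem.List.insert (pre ++ List.replicate k "0000" ++ "" :: suf) (i : Int) "0000") := rfl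
      rw [hstep, hidx, Option.map_some]
      rw [PySem.List.insert_natCast _ _ _ (by simp), List.take_left, List.drop_left]
      simp [List.replicate_succ' (n := k), List.append_assoc]

-- the element already has length ≥ 4, zfill is the identity on it
theorem zfill_of_ge (g : String) (h : ¬ PySem.Str.len g < 4) :
    PySem.Str.zfill g 4 = g := by
  rw [PySem.Str.len_eq] at h
  simp only [PySem.Str.zfill, PySem.Chars.zfill]
  rw [if_pos (by omega)]
  exact String.ofList_toList

def fixGroup (g : String) : String := if PySem.Str.len g < 4 then PySem.Str.zfill g 4 else g

theorem fixGroup_eq_zfill (g : String) : fixGroup g = PySem.Str.zfill g 4 := by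
  unfold fixGroup
  split_ifs with h
  · rfl
  · exact (zfill_of_ge g h).symm

-- helper for the in-place update under the enumerate loop
theorem set_append_cons {α : Type} (c t : List α) (x v : α) :
    (c ++ x :: t).set c.length v = c ++ v :: t := by
  induction c with
  | nil => rfl
  | cons y c ih => simp [ih]

-- A's second loop (index-wise in-place zfill) is an elementwise map
theorem enum_setloop (l c : List String) :
    (PySem.List.enumerate l (c.length : Int)).foldl
      (fun acc p => if PySem.Str.len p.2 < 4 then PySem.List.pySetD acc p.1 (PySem.Str.zfill p.2 4) else acc)
      (c ++ l) = c ++ l.map fixGroup := by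
  induction l generalizing c with
  | nil => simp
  | cons x t ih =>
      rw [PySem.List.enumerate_cons, List.foldl_cons]
      have hstep : (if PySem.Str.len x < 4 then
            PySem.List.pySetD (c ++ x :: t) ((c.length : Int)) (PySem.Str.zfill x 4) else c ++ x :: t)
          = (c ++ [fixGroup x]) ++ t := by
        unfold fixGroup
        split_ifs with h
        · rw [PySem.List.pySetD_natCast, set_append_cons]; simp
        · simp
      rw [hstep]
      have hlen : ((c.length : Int)) + 1 = ((c ++ [fixGroup x]).length : Int) := by
        simp
      rw [hlen, ih (c ++ [fixGroup x])]
      simp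

-- B's loop once the flag is set: it only appends zfilled groups
theorem foldl_fillStepB_filled (n : Int) (gs : List String) (acc : List String) :
    gs.foldl (fillStepB n) (acc, true) = (acc ++ gs.map (fun g => PySem.Str.zfill g 4), true) := by
  induction gs generalizing acc with
  | nil => simp
  | cons g t ih => simp [List.foldl_cons, fillStepB, ih]

-- B's loop with the flag unset over pre ++ "" :: suf: zfills pre, splices the zeros at the first "",
-- sets the flag, then zfills the rest
theorem foldl_fillStepB_unfilled (n : Int) (pre suf acc : List String) (h : "" ∉ pre) :
    (pre ++ "" :: suf).foldl (fillStepB n) (acc, false) =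
      (acc ++ pre.map (fun g => PySem.Str.zfill g 4) ++ PySem.List.pyRepeat ["0000"] n
        ++ PySem.Str.zfill "" 4 :: suf.map (fun g => PySem.Str.zfill g 4), true) := by
  induction pre generalizing acc with
  | nil =>
      simp only [List.nil_append, List.foldl_cons, List.map_nil, List.append_nil]
      have : fillStepB n (acc, false) "" =
          (acc ++ PySem.List.pyRepeat ["0000"] n ++ [PySem.Str.zfill "" 4], true) := by
        simp [fillStepB]
      rw [this, foldl_fillStepB_filled]
      simp
  | cons g t ih =>
      have hg : g ≠ "" := fun hgg => h (hgg ▸ List.mem_cons_self)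
      have hstep : fillStepB n (acc, false) g = (acc ++ [PySem.Str.zfill g 4], false) := by
        simp [fillStepB, hg]
      rw [List.cons_append, List.foldl_cons, hstep,
        ih (acc ++ [PySem.Str.zfill g 4]) (fun hm => h (List.mem_cons_of_mem _ hm))]
      simp

-- ===== VERDICT (by name: the statement is the Claim_ definition above) =====
theorem fill_ipv6_spec : Claim_equal_fill_ipv6 := by
  intro ip _ hpre
  unfold Spec_fill_ipv6 fill_ipv6 fill_ipv6_alt
  dsimp only
  unfold Pre_fill_ipv6 at hpre
  set gs : List String := (PySem.Str.split? ip ":").getD [] with hgs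
  clear_value gs
  by_cases hn : (0 : Int) < 8 - PySem.List.len gs
  · -- fewer than 8 groups: A iterates insert, B emits the zeros inline at the first ""
    have hmem : "" ∈ gs := by
      rcases hpre with h8 | h
      · rw [PySem.List.len_eq] at hn; omega
      · exact h
    obtain ⟨i, hi⟩ : ∃ i, PySem.List.index? gs "" = some i :=
      Option.isSome_iff_exists.mp ((PySem.List.index?_isSome_iff gs "").mpr hmem)
    obtain ⟨pre, suf, hsplit, hlen, hnotin⟩ := (PySem.List.index?_eq_some_iff gs "" i).mp hi
    rw [foldl_ignore_iterate, PySem.List.pyRange_one, List.length_map, List.length_range, hsplit]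
    simp only [Int.sub_zero]
    rw [iterate_fillStepA pre suf hnotin]
    dsimp only
    have hd : (decide (8 - PySem.List.len (pre ++ "" :: suf) ≤ 0)) = false := by
      rw [hsplit] at hn
      simpa using hn
    rw [hd, foldl_fillStepB_unfilled _ _ _ _ hnotin]
    dsimp only
    have hmap := enum_setloop (pre ++ List.replicate (8 - PySem.List.len (pre ++ "" :: suf)).toNat "0000" ++ "" :: suf) []
    simp only [List.length_nil, Nat.cast_zero, List.nil_append] at hmap
    rw [hmap]
    congr 1
    rw [List.map_congr_left fun g _ => fixGroup_eq_zfill g]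
    have hz : PySem.Str.zfill "0000" 4 = "0000" := zfill_of_ge _ (by decide)
    simp [PySem.List.pyRepeat_singleton, List.map_replicate, hz, List.append_assoc]
  · -- 8 or more groups: no insertion on either side, B starts with the flag set
    rw [foldl_ignore_iterate, PySem.List.pyRange_one, List.length_map, List.length_range]
    simp only [Int.sub_zero]
    have hz : (8 - PySem.List.len gs).toNat = 0 := by
      rw [PySem.List.len_eq] at hn ⊢; omega
    rw [hz]
    simp only [Function.iterate_zero, id_eq]
    have hd : (decide (8 - PySem.List.len gs ≤ 0)) = true := by
      rw [PySem.List.len_eq] at hn ⊢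
      simpa using hn
    rw [hd, foldl_fillStepB_filled]
    dsimp only
    have hmap := enum_setloop gs []
    simp only [List.length_nil, Nat.cast_zero, List.nil_append] at hmap
    rw [hmap]
    simp only [List.nil_append]
    congr 1
    exact List.map_congr_left fun g _ => fixGroup_eq_zfill g
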